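-- pv_equiv track=rewrite | github.com/ApplaudMedical/utilities | utils.py | filter_by_name_frags
-- ===== SOURCE A (Python) =====
-- def filter_by_name_frags(name, name_frags, in_order=True):
-- 	'''
-- 	Yields 'name' if it separately contains all the strings within 'name_frags'. If 'in_order' is True, name fragements must be in order.
--
-- 	Parameters
-- 	----------
-- 	name : string
-- 		String to be returned if it contains all of 'name_frags'
-- 	name_frags : list of strings
-- 		Name fragments that 'name' must contain to be yielded
-- 	in_order : boolean
-- 		If true, 'name' must contain 'name_frags' in the order they are specified
--
-- 	Returns
-- 	-------
-- 	Yields 'name' or nothing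
-- 	'''
--
-- 	# simply yield name if there are no name fragments with which to filter
-- 	if len(name_frags) == 0:
-- 		yield name
-- 	# working name is pruned as fragments are found within name to ensure fragments are found in order
-- 	working_name = name
--
-- 	# split any name fragments with '*' into two separate name fragments
-- 	expanded_name_frags = []
-- 	for frag in name_frags:
-- 		expanded_name_frags += frag.split('*')
--
-- 	for i, frag in enumerate(expanded_name_frags):
-- 		try:
-- 			idx = working_name.index(frag)
-- 			frag_end_idx = idx + len(frag)
-- 			if in_order:
-- 				# if fragment is found in working name, prune working_name if order matters
-- 				working_name = working_name[frag_end_idx:]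
-- 			if i == len(expanded_name_frags) - 1:
-- 				# last fragment has been found; yield name
-- 				yield name
-- 		except ValueError:
-- 			# name fragment does not exist within working_name; name is filtered out
-- 			break
-- ===== SOURCE B (Python) =====
-- def filter_by_name_frags(name, name_frags, in_order=True):
--     # Generator: yields name iff it contains every (star-expanded) fragment,
--     # in order when in_order is True (empty name_frags yields name).
--     # The ordered check places fragments greedily from the RIGHT: an ordered
--     # placement exists iff the last fragment fits as far right as possible and
--     # the remaining fragments fit, in order, before it (exchange argument).
--     if not name_frags:
--         yield name
--         return
--     frags = [piece for frag in name_frags for piece in frag.split('*')]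
--     if in_order:
--         ok = True
--         end = len(name)
--         for frag in reversed(frags):
--             idx = name.rfind(frag, 0, end)
--             if idx == -1:
--                 ok = False
--                 break
--             end = idx
--     else:
--         ok = all(frag in name for frag in frags)
--     if ok:
--         yield name
-- ===== Notes on version B (the rewrite author's own statement) =====
-- stated objective: alternative
-- what changed: B flattens the fragments once and decides the ordered case by a reversed scan that places each fragment greedily as far RIGHT as possible (name.rfind(frag, 0, end) with a shrinking end bound), correct by an exchange argument against A's left-to-right slice-and-shrink greedy; the unordered case becomes a plain all(frag in name).
import Mathlib
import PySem

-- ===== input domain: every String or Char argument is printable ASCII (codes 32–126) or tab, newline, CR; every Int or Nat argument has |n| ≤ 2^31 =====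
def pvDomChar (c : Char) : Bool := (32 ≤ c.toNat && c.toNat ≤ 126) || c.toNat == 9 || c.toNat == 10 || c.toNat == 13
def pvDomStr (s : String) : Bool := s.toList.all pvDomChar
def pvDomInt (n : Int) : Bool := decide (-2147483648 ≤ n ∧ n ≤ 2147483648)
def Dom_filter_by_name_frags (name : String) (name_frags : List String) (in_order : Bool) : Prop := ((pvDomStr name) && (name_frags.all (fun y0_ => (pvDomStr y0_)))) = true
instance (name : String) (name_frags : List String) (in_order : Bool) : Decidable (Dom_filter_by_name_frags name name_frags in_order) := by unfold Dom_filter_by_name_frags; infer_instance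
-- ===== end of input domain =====

-- B replaces A's left-to-right slice-and-shrink greedy by a reversed scan placing each
-- fragment greedily as far RIGHT as possible (rfind with a shrinking end bound); the
-- unordered case becomes all(frag in name). Objective: alternative algorithm, same cost.
-- Both are ported as the list of values the Python generator yields.

-- ===== PORT A =====
-- the main 'for i, frag in enumerate(expanded_name_frags)' loop, with 'break' as returning []
def pvALoop (name : String) (in_order : Bool) (total : Nat) :
    List (Int × String) → String → List String
  | [], _ => []
  | (i, frag) :: rest, working =>
    -- working_name.index(frag) raises ValueError exactly when find = -1 (the except/break)
    let idx := PySem.Str.find working frag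
    if idx = -1 then []
    else
      let frag_end_idx := idx + PySem.Str.len frag
      let working' := if in_order then PySem.Str.slice working (some frag_end_idx) none else working
      (if i = (total : Int) - 1 then [name] else []) ++ pvALoop name in_order total rest working'

def filter_by_name_frags (name : String) (name_frags : List String) (in_order : Bool) : List String :=
  let init := if name_frags.length = 0 then [name] else []
  let expanded_name_frags := name_frags.foldl (fun acc frag => acc ++ (PySem.Str.split? frag "*").getD []) []
  init ++ pvALoop name in_order expanded_name_frags.length
            (PySem.List.enumerate expanded_name_frags 0) name

-- ===== PORT B =====
-- the in_order=True reversed scan: end bound shrunk to idx = name.rfind(frag, 0, end)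
def pvBScanR (name : String) : List String → Int → Bool
  | [], _ => true
  | frag :: rest, e =>
    let idx := PySem.Str.rfindFrom name frag 0 (some e)
    if idx = -1 then false else pvBScanR name rest idx

def filter_by_name_frags_alt (name : String) (name_frags : List String) (in_order : Bool) : List String :=
  if name_frags = [] then [name]
  else
    let frags := name_frags.flatMap (fun f => (PySem.Str.split? f "*").getD [])
    let ok := if in_order then pvBScanR name frags.reverse (PySem.Str.len name)
              else frags.all (fun f => PySem.Str.isIn f name)
    if ok then [name] else []

-- ===== PRECONDITION & SPEC =====
def Spec_filter_by_name_frags (name : String) (name_frags : List String) (in_order : Bool) (out : List String) : Prop := out = filter_by_name_frags_alt name name_frags in_order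
instance (name : String) (name_frags : List String) (in_order : Bool) (out : List String) : Decidable (Spec_filter_by_name_frags name name_frags in_order out) := by unfold Spec_filter_by_name_frags; infer_instance

-- ===== CLAIM (what is proved, stated in full; the proofs are below) =====
def Claim_equal_filter_by_name_frags : Prop := ∀ (name : String) (name_frags : List String) (in_order : Bool), Dom_filter_by_name_frags name name_frags in_order → Spec_filter_by_name_frags name name_frags in_order (filter_by_name_frags name name_frags in_order)

-- ===== LEMMAS AND PROOFS =====

-- proof-side helper: A's left-to-right greedy as a boolean scan (find from a position)
def pvScanL (name : String) : List String → Int → Bool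
  | [], _ => true
  | frag :: rest, pos =>
    let idx := PySem.Str.findFrom name frag pos
    if idx = -1 then false else pvScanL name rest (idx + PySem.Str.len frag)

-- proof-side: an ordered placement of the fragments within name[lo:hi]
def pvOcc (nm : List Char) : List String → Nat → Nat → Prop
  | [], lo, hi => lo ≤ hi
  | f :: r, lo, hi =>
      ∃ i : Nat, lo ≤ i ∧ i + f.toList.length ≤ hi ∧ f.toList <+: nm.drop i ∧
        pvOcc nm r (i + f.toList.length) hi

lemma pv_occ_le (nm : List Char) :
    ∀ (l : List String) (lo hi : Nat), pvOcc nm l lo hi → lo ≤ hi := by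
  intro l
  induction l with
  | nil => intro lo hi h; exact h
  | cons f r ih =>
    intro lo hi h
    obtain ⟨i, h1, _, _, h4⟩ := h
    have := ih _ _ h4
    omega

lemma pv_occ_mono_lo (nm : List Char) :
    ∀ (l : List String) (lo lo' hi : Nat), lo' ≤ lo → pvOcc nm l lo hi → pvOcc nm l lo' hi := by
  intro l
  induction l with
  | nil => intro lo lo' hi hle h; exact le_trans hle h
  | cons f r _ =>
    intro lo lo' hi hle h
    obtain ⟨i, h1, h2, h3, h4⟩ := h
    exact ⟨i, le_trans hle h1, h2, h3, h4⟩

lemma pv_occ_mono_hi (nm : List Char) :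
    ∀ (l : List String) (lo hi hi' : Nat), hi ≤ hi' → pvOcc nm l lo hi → pvOcc nm l lo hi' := by
  intro l
  induction l with
  | nil => intro lo hi hi' hle h; exact le_trans h hle
  | cons f r ih =>
    intro lo hi hi' hle h
    obtain ⟨i, h1, h2, h3, h4⟩ := h
    exact ⟨i, h1, le_trans h2 hle, h3, ih _ _ _ hle h4⟩

lemma pv_occ_append (nm : List Char) (f : String) :
    ∀ (xs : List String) (lo hi : Nat),
      pvOcc nm (xs ++ [f]) lo hi ↔
        ∃ i : Nat, i + f.toList.length ≤ hi ∧ f.toList <+: nm.drop i ∧ pvOcc nm xs lo i := by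
  intro xs
  induction xs with
  | nil =>
    intro lo hi
    constructor
    · rintro ⟨i, h1, h2, h3, _⟩; exact ⟨i, h2, h3, by simpa [pvOcc] using h1⟩
    · rintro ⟨i, h2, h3, h1⟩
      exact ⟨i, by simpa [pvOcc] using h1, h2, h3, by simp only [pvOcc]; omega⟩
  | cons x r ih =>
    intro lo hi
    constructor
    · rintro ⟨j, hj1, hj2, hj3, hrest⟩
      obtain ⟨i, hi1, hi2, hi3⟩ := (ih _ _).mp hrest
      exact ⟨i, hi1, hi2, j, hj1, le_trans (pv_occ_le nm _ _ _ hi3) (by omega), hj3, hi3⟩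
    · rintro ⟨i, hi1, hi2, j, hj1, hj2, hj3, hrest⟩
      exact ⟨j, hj1, by omega, hj3, (ih _ _).mpr ⟨i, hi1, hi2, hrest⟩⟩

-- spec of the hand side of PySem.Chars.rfind.go: the HIGHEST occurrence index ≤ k, or -1
lemma pv_rfind_go_cases (s sub : List Char) :
    ∀ k : Nat,
      (PySem.Chars.rfind.go s sub k = -1 ∧ ∀ i ≤ k, ¬ sub <+: s.drop i) ∨
      (∃ j : Nat, PySem.Chars.rfind.go s sub k = (j : Int) ∧ j ≤ k ∧ sub <+: s.drop j ∧
        ∀ i, j < i → i ≤ k → ¬ sub <+: s.drop i) := by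
  intro k
  induction k with
  | zero =>
    by_cases h : sub.isPrefixOf s = true
    · right
      refine ⟨0, ?_, le_refl 0, by simpa using List.isPrefixOf_iff_prefix.mp h, ?_⟩
      · simp [PySem.Chars.rfind.go, h]
      · intro i h1 h2 _; omega
    · left
      constructor
      · simp [PySem.Chars.rfind.go, h]
      · intro i hi hpre
        interval_cases i
        exact h (List.isPrefixOf_iff_prefix.mpr (by simpa using hpre))
  | succ n ih =>
    by_cases h : sub.isPrefixOf (s.drop (n + 1)) = true
    · right
      refine ⟨n + 1, ?_, le_refl _, List.isPrefixOf_iff_prefix.mp h, ?_⟩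
      · simp [PySem.Chars.rfind.go, h]
      · intro i h1 h2; omega
    · have hgo : PySem.Chars.rfind.go s sub (n + 1) = PySem.Chars.rfind.go s sub n := by
        simp [PySem.Chars.rfind.go, h]
      have hnp : ¬ sub <+: s.drop (n + 1) :=
        fun hp => h (List.isPrefixOf_iff_prefix.mpr hp)
      rcases ih with ⟨h1, h2⟩ | ⟨j, h1, h2, h3, h4⟩
      · left
        refine ⟨hgo ▸ h1, ?_⟩
        intro i hi
        rcases Nat.lt_or_ge i (n + 1) with hlt | hge
        · exact h2 i (by omega)
        · have : i = n + 1 := by omega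
          exact this ▸ hnp
      · right
        refine ⟨j, hgo ▸ h1, by omega, h3, ?_⟩
        intro i hji hi
        rcases Nat.lt_or_ge i (n + 1) with hlt | hge
        · exact h4 i hji (by omega)
        · have : i = n + 1 := by omega
          exact this ▸ hnp

-- rfindFrom with start 0 and a valid end bound is rfind on the take-prefix
lemma pv_rfindFrom_take (s sub : List Char) (e : Nat) (he : e ≤ s.length) :
    PySem.Chars.rfindFrom s sub 0 (some (e : Int)) =
      PySem.Chars.rfind (s.take e) sub := by
  have h1 : ¬ ((s.length : Int) < (e : Int)) := by exact_mod_cast not_lt.mpr he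
  have h2 : ¬ ((e : Int) < 0) := by omega
  simp only [PySem.Chars.rfindFrom, PySem.Chars.rfind, h1, h2, if_false]
  simp only [Int.toNat_natCast]
  split_ifs with h3 h4 <;> first
    | omega
    | simp_all

-- occurrence within a take-prefix = occurrence + end bound
lemma pv_prefix_take_drop (nm sub : List Char) (e i : Nat) :
    sub <+: (nm.take e).drop i ↔ (sub <+: nm.drop i ∧ i + sub.length ≤ e ∨ sub = [] ) := by
  rw [List.drop_take, List.prefix_take_iff]
  constructor
  · rintro ⟨hp, hl⟩
    by_cases hie : i ≤ e
    · exact Or.inl ⟨hp, by omega⟩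
    · have : e - i = 0 := by omega
      rw [this] at hl
      exact Or.inr (List.length_eq_zero_iff.mp (by omega))
  · rintro (⟨hp, hl⟩ | hnil)
    · exact ⟨hp, by omega⟩
    · subst hnil; simp

-- A's loop (in_order=True) computes the left-to-right greedy scan
lemma pv_aLoop_true (name : String) (total : Nat) :
    ∀ (l : List String) (s : Nat) (w : String) (pos : Nat),
      s + l.length = total →
      w.toList = name.toList.drop pos → pos ≤ name.toList.length →
      pvALoop name true total (PySem.List.enumerate l (s : Int)) w =
        (if pvScanL name l (pos : Int) = true ∧ l ≠ [] then [name] else []) := by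
  intro l
  induction l with
  | nil => intro s w pos _ _ _; simp [PySem.List.enumerate_nil, pvALoop]
  | cons p rest ih =>
    intro s w pos hs hw hpos
    rw [PySem.List.enumerate_cons]
    have hfind : PySem.Str.find w p = PySem.Chars.find (name.toList.drop pos) p.toList := by
      rw [PySem.Str.find_eq, hw]
    have hff : PySem.Str.findFrom name p (pos : Int) none =
        (if PySem.Chars.find (name.toList.drop pos) p.toList = -1 then -1
         else (pos : Int) + PySem.Chars.find (name.toList.drop pos) p.toList) := by
      rw [PySem.Str.findFrom_eq]
      exact PySem.Chars.findFrom_natCast _ _ pos hpos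
    set j := PySem.Chars.find (name.toList.drop pos) p.toList with hjdef
    by_cases hj : j = -1
    · simp only [pvALoop, pvScanL, hfind, hff, hj, ite_true]
      simp
    · have hj0 : 0 ≤ j := by
        have := PySem.Chars.neg_one_le_find (name.toList.drop pos) p.toList
        omega
      have hpre := (PySem.Chars.find_spec (hjdef ▸ hj0)).1
      have hlenle := hpre.length_le
      simp only [List.length_drop, ← hjdef] at hlenle
      have hjle : j ≤ ((name.toList.drop pos).length : Int) :=
        hjdef ▸ PySem.Chars.find_le_length _ _
      simp only [List.length_drop] at hjle
      have hpos' : pos + j.toNat + p.toList.length ≤ name.toList.length := by omega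
      have hwork : (PySem.Str.slice w (some (j + PySem.Str.len p)) none).toList =
          name.toList.drop (pos + j.toNat + p.toList.length) := by
        rw [PySem.Str.toList_slice, PySem.Chars.slice_eq_listSlice,
          PySem.List.slice_from _ (by rw [PySem.Str.len_eq]; omega), hw, List.drop_drop]
        congr 1
        rw [PySem.Str.len_eq]
        omega
      have hs1 : ((s : Int) + 1) = ((s + 1 : Nat) : Int) := by push_cast; ring
      have harg : (pos : Int) + j + PySem.Str.len p =
          ((pos + j.toNat + p.toList.length : Nat) : Int) := by
        rw [PySem.Str.len_eq]; push_cast; omega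
      have hpj : ¬ ((pos : Int) + j = -1) := by omega
      have hIH := ih (s + 1) (PySem.Str.slice w (some (j + PySem.Str.len p)) none)
        (pos + j.toNat + p.toList.length) (by simp at hs ⊢; omega) hwork hpos'
      simp only [pvALoop, pvScanL, hfind, hff, if_neg hj, harg, hs1, if_true]
      rw [hIH]
      by_cases hrest : rest = []
      · subst hrest
        simp only [List.length_cons, List.length_nil] at hs
        have hlast : (s : Int) = (total : Int) - 1 := by omega
        simp [hlast, pvScanL, hpj]
      · have hslt : ¬ ((s : Int) = (total : Int) - 1) := by
          have hr1 : rest.length ≥ 1 := by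
            cases rest with | nil => exact absurd rfl hrest | cons _ _ => simp
          simp only [List.length_cons] at hs
          omega
        simp [hslt, hrest, hpj]

-- A's loop (in_order=False) checks membership of every fragment in name
lemma pv_aLoop_false (name : String) (total : Nat) :
    ∀ (l : List String) (s : Nat),
      s + l.length = total →
      pvALoop name false total (PySem.List.enumerate l (s : Int)) name =
        (if (l.all (fun f => PySem.Str.isIn f name)) = true ∧ l ≠ [] then [name] else []) := by
  intro l
  induction l with
  | nil => intro s _; simp [PySem.List.enumerate_nil, pvALoop]
  | cons p rest ih =>
    intro s hs
    rw [PySem.List.enumerate_cons]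
    by_cases hj : PySem.Chars.find name.toList p.toList = -1
    · have hni : PySem.Chars.isIn p.toList name.toList = false := by
        rw [PySem.Chars.isIn_eq_false_iff]
        exact (PySem.Chars.find_eq_neg_one_iff _ _).mp hj
      simp [pvALoop, PySem.Str.find_eq, hj, hni]
    · have hi : PySem.Chars.isIn p.toList name.toList = true := by
        rw [PySem.Chars.isIn_iff_infix]
        exact (PySem.Chars.find_ne_neg_one_iff _ _).mp hj
      have hs1 : ((s : Int) + 1) = ((s + 1 : Nat) : Int) := by push_cast; ring
      have hIH := ih (s + 1) (by simp at hs ⊢; omega)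
      simp only [pvALoop, PySem.Str.find_eq, if_neg hj, Bool.false_eq_true, ite_false, hs1]
      rw [hIH]
      by_cases hrest : rest = []
      · subst hrest
        simp only [List.length_cons, List.length_nil] at hs
        have hlast : (s : Int) = (total : Int) - 1 := by omega
        simp [hlast, hi]
      · have hslt : ¬ ((s : Int) = (total : Int) - 1) := by
          have hr1 : rest.length ≥ 1 := by
            cases rest with | nil => exact absurd rfl hrest | cons _ _ => simp
          simp only [List.length_cons] at hs
          omega
        simp [hslt, hrest, hi]

-- the left greedy scan succeeds iff an ordered placement exists
lemma pv_scanL_iff (name : String) :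
    ∀ (l : List String) (pos : Nat), pos ≤ name.toList.length →
      (pvScanL name l (pos : Int) = true ↔ pvOcc name.toList l pos name.toList.length) := by
  intro l
  induction l with
  | nil => intro pos hpos; simpa [pvScanL, pvOcc] using hpos
  | cons f r ih =>
    intro pos hpos
    have hff : PySem.Str.findFrom name f (pos : Int) none =
        (if PySem.Chars.find (name.toList.drop pos) f.toList = -1 then -1
         else (pos : Int) + PySem.Chars.find (name.toList.drop pos) f.toList) := by
      rw [PySem.Str.findFrom_eq]
      exact PySem.Chars.findFrom_natCast _ _ pos hpos
    set j := PySem.Chars.find (name.toList.drop pos) f.toList with hjdef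
    by_cases hj : j = -1
    · have hno : ∀ i : Nat, pos ≤ i → ¬ f.toList <+: name.toList.drop i := by
        intro i hi hp
        have hdd : (name.toList.drop pos).drop (i - pos) = name.toList.drop i := by
          rw [List.drop_drop]; congr 1; omega
        have hp' : f.toList <+: (name.toList.drop pos).drop (i - pos) := by
          rw [hdd]; exact hp
        have hinf : f.toList <:+: name.toList.drop pos :=
          hp'.isInfix.trans (List.drop_suffix _ _).isInfix
        exact (PySem.Chars.find_eq_neg_one_iff _ _).mp (hjdef ▸ hj) hinf
      constructor
      · intro h
        simp only [pvScanL, hff, hj] at h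
        simp at h
      · rintro ⟨i, hi1, _, hi3, _⟩
        exact absurd hi3 (hno i hi1)
    · have hj0 : 0 ≤ j := by
        have := PySem.Chars.neg_one_le_find (name.toList.drop pos) f.toList
        omega
      have hspec := PySem.Chars.find_spec (hjdef ▸ hj0)
      rw [← hjdef] at hspec
      have hpre : f.toList <+: name.toList.drop (pos + j.toNat) := by
        have h1 := hspec.1
        rwa [List.drop_drop] at h1
      have hmin : ∀ i < j.toNat, ¬ f.toList <+: name.toList.drop (pos + i) := by
        intro i hi hp
        refine hspec.2 i hi ?_
        rw [List.drop_drop]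
        exact hp
      have hlenle := hpre.length_le
      simp only [List.length_drop] at hlenle
      have hjle : j ≤ ((name.toList.drop pos).length : Int) :=
        hjdef ▸ PySem.Chars.find_le_length _ _
      simp only [List.length_drop] at hjle
      have hpos' : pos + j.toNat + f.toList.length ≤ name.toList.length := by omega
      have harg : (pos : Int) + j + PySem.Str.len f =
          ((pos + j.toNat + f.toList.length : Nat) : Int) := by
        rw [PySem.Str.len_eq]; push_cast; omega
      have hpj : ¬ ((pos : Int) + j = -1) := by omega
      have hIH := ih (pos + j.toNat + f.toList.length) hpos'
      constructor
      · intro h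
        simp only [pvScanL, hff, if_neg hj, if_neg hpj, harg] at h
        exact ⟨pos + j.toNat, by omega, hpos', hpre, (hIH.mp h)⟩
      · rintro ⟨i, hi1, hi2, hi3, hi4⟩
        have hile : pos + j.toNat ≤ i := by
          by_contra hcon
          exact hmin (i - pos) (by omega)
            (by rw [show pos + (i - pos) = i by omega]; exact hi3)
        have hocc' : pvOcc name.toList r (pos + j.toNat + f.toList.length) name.toList.length :=
          pv_occ_mono_lo _ _ _ _ _ (by omega) hi4
        simp only [pvScanL, hff, if_neg hj, if_neg hpj, harg]
        exact hIH.mpr hocc'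

-- the reversed rightmost scan succeeds iff an ordered placement exists
lemma pv_scanR_iff (name : String) :
    ∀ (l : List String) (e : Nat), e ≤ name.toList.length →
      (pvBScanR name l (e : Int) = true ↔ pvOcc name.toList l.reverse 0 e) := by
  intro l
  induction l with
  | nil => intro e _; simp [pvBScanR, pvOcc]
  | cons f r ih =>
    intro e he
    have hrf : PySem.Str.rfindFrom name f 0 (some (e : Int)) =
        PySem.Chars.rfind (name.toList.take e) f.toList := by
      rw [PySem.Str.rfindFrom_eq]
      exact pv_rfindFrom_take _ _ e he
    have hlen : (name.toList.take e).length = e := by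
      rw [List.length_take]; omega
    have hrev : (f :: r).reverse = r.reverse ++ [f] := by simp
    rcases pv_rfind_go_cases (name.toList.take e) f.toList e with ⟨h1, h2⟩ | ⟨j, h1, h2, h3, h4⟩
    · have hgo : PySem.Chars.rfind (name.toList.take e) f.toList = -1 := by
        rw [PySem.Chars.rfind, hlen]; exact h1
      constructor
      · intro h
        simp only [pvBScanR, hrf, hgo] at h
        simp at h
      · intro h
        rw [hrev, pv_occ_append] at h
        obtain ⟨i, hi1, hi2, _⟩ := h
        exact absurd
          ((pv_prefix_take_drop _ _ e i).mpr
            (by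
              by_cases hnil : f.toList = []
              · exact Or.inr hnil
              · exact Or.inl ⟨hi2, hi1⟩))
          (h2 i (by omega))
    · have hgo : PySem.Chars.rfind (name.toList.take e) f.toList = (j : Int) := by
        rw [PySem.Chars.rfind, hlen]; exact h1
      rcases (pv_prefix_take_drop name.toList f.toList e j).mp h3 with ⟨hj1, hj2⟩ | hjnil
      case inr =>
        -- empty fragment: found at j = e (the highest index), always placeable
        have hje : j = e := by
          by_contra hne
          have hjlt : j < e := by omega
          exact h4 e (by omega) (le_refl e) (by rw [hjnil]; exact List.nil_prefix)
        subst hje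
        have hIH := ih j (by omega)
        have hjn : ¬ ((j : Int) = -1) := by omega
        constructor
        · intro h
          simp only [pvBScanR, hrf, hgo, if_neg hjn] at h
          rw [hrev, pv_occ_append]
          refine ⟨j, by rw [hjnil]; simp, by rw [hjnil]; exact List.nil_prefix, hIH.mp h⟩
        · intro h
          rw [hrev, pv_occ_append] at h
          obtain ⟨i, hi1, hi2, hi3⟩ := h
          have : pvOcc name.toList r.reverse 0 j :=
            pv_occ_mono_hi _ _ _ _ _ (by rw [hjnil] at hi1; simpa using hi1) hi3
          simp only [pvBScanR, hrf, hgo, if_neg hjn]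
          exact hIH.mpr this
      case inl =>
        have hIH := ih j (by omega)
        have hjn : ¬ ((j : Int) = -1) := by omega
        constructor
        · intro h
          simp only [pvBScanR, hrf, hgo, if_neg hjn] at h
          rw [hrev, pv_occ_append]
          exact ⟨j, hj2, hj1, hIH.mp h⟩
        · intro h
          rw [hrev, pv_occ_append] at h
          obtain ⟨i, hi1, hi2, hi3⟩ := h
          have hile : i ≤ j := by
            by_contra hcon
            exact h4 i (by omega) (by omega)
              ((pv_prefix_take_drop _ _ e i).mpr
                (by
                  by_cases hnil : f.toList = []
                  · exact Or.inr hnil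
                  · exact Or.inl ⟨hi2, hi1⟩))
          have : pvOcc name.toList r.reverse 0 j :=
            pv_occ_mono_hi _ _ _ _ _ hile hi3
          simp only [pvBScanR, hrf, hgo, if_neg hjn]
          exact hIH.mpr this

-- via the placement predicate: left greedy from 0 agrees with reversed rightmost greedy from len
lemma pv_scanL_eq_scanR (name : String) (l : List String) :
    pvScanL name l 0 = pvBScanR name l.reverse (PySem.Str.len name) := by
  have hlen : PySem.Str.len name = ((name.toList.length : Nat) : Int) := by
    rw [PySem.Str.len_eq]
  have hL := pv_scanL_iff name l 0 (Nat.zero_le _)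
  have hR := pv_scanR_iff name l.reverse name.toList.length (le_refl _)
  rw [List.reverse_reverse] at hR
  rw [hlen]
  have : (pvScanL name l ((0:Nat):Int) = true) ↔
      (pvBScanR name l.reverse ((name.toList.length : Nat) : Int) = true) := by
    rw [hL, hR]
  rcases Bool.eq_false_or_eq_true (pvScanL name l ((0:Nat):Int)) with h | h <;>
    rcases Bool.eq_false_or_eq_true (pvBScanR name l.reverse ((name.toList.length:Nat):Int)) with h' | h' <;>
    simp_all

lemma pv_splitOn_go_ne_nil (sep : List Char) :
    ∀ (fuel : Nat) (l cur : List Char) (acc : List (List Char)),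
      PySem.Chars.splitOn.go sep fuel l cur acc ≠ [] := by
  intro fuel
  induction fuel with
  | zero => intro l cur acc; simp [PySem.Chars.splitOn.go]
  | succ n ih =>
    intro l cur acc
    cases l with
    | nil => simp [PySem.Chars.splitOn.go]
    | cons c rest =>
      rw [PySem.Chars.splitOn.go]
      split_ifs with h
      · exact ih _ _ _
      · exact ih _ _ _

lemma pv_pieces_ne_nil (f : String) : (PySem.Str.split? f "*").getD [] ≠ [] := by
  have h := PySem.Str.split?_map f "*"
  cases hz : PySem.Str.split? f "*" with
  | none => rw [hz] at h; simp [PySem.Chars.split?] at h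
  | some zs =>
    rw [hz] at h
    simp [PySem.Chars.split?] at h
    intro hnil
    subst hnil
    simp [PySem.Chars.splitOn] at h
    exact pv_splitOn_go_ne_nil _ _ _ _ _ h

-- ===== VERDICT (by name: the statement is the Claim_ definition above) =====
theorem filter_by_name_frags_spec : Claim_equal_filter_by_name_frags := by
  intro name frags io _
  unfold Spec_filter_by_name_frags
  by_cases hf : frags = []
  · subst hf
    simp [filter_by_name_frags, filter_by_name_frags_alt, pvALoop, PySem.List.enumerate_nil]
  · have hne : (frags.flatMap (fun f => (PySem.Str.split? f "*").getD [])) ≠ [] := by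
      cases frags with
      | nil => exact absurd rfl hf
      | cons f t =>
        simp only [List.flatMap_cons]
        exact fun h => pv_pieces_ne_nil f (List.append_eq_nil_iff.mp h).1
    simp only [filter_by_name_frags, filter_by_name_frags_alt,
      PySem.List.foldl_append_eq_flatMap, List.nil_append,
      List.length_eq_zero_iff, if_neg hf]
    cases io with
    | false =>
      have h0 := pv_aLoop_false name
        (frags.flatMap (fun f => (PySem.Str.split? f "*").getD [])).length
        (frags.flatMap (fun f => (PySem.Str.split? f "*").getD [])) 0 (by simp)
      simp only [Nat.cast_zero] at h0
      rw [h0]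
      simp [hne]
    | true =>
      have h := pv_aLoop_true name
        (frags.flatMap (fun f => (PySem.Str.split? f "*").getD [])).length
        (frags.flatMap (fun f => (PySem.Str.split? f "*").getD [])) 0 name 0
        (by simp) (by simp) (by simp)
      simp only [Nat.cast_zero] at h
      rw [h]
      rw [pv_scanL_eq_scanR name (frags.flatMap (fun f => (PySem.Str.split? f "*").getD []))] at h ⊢
      simp [hne]
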